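-- pv_equiv track=rewrite | github.com/Lanzyu369/Lumina-Layers | core/calibration.py | sequence_id_from_sequence
-- ===== SOURCE A (Python) =====
-- from typing import Optional, List, Tuple, Generator
--
-- def sequence_id_from_sequence(seq: List[int]) -> int:
--     """Convert a sequence back to its ID."""
--     if len(seq) == 0:
--         return 0
--
--     # Calculate offset for this length group
--     offset = sum(4 ** l for l in range(len(seq)))  # 1 + 4 + 16 + ... before this length
--
--     # Calculate position within the group
--     position = 0
--     for i, val in enumerate(seq):
--         position = position * 4 + val
--
--     return offset + position
-- ===== SOURCE B (Python) =====
-- from typing import List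
--
-- def sequence_id_from_sequence(seq: List[int]) -> int:
--     """Convert a sequence back to its ID (single Horner-style fold)."""
--     result = 0
--     for val in seq:
--         result = result * 4 + val + 1
--     return result
-- ===== Notes on version B (the rewrite author's own statement) =====
-- stated objective: faster
-- what changed: Replaced the two-pass structure (geometric-sum offset recomputing 4**l for each l, plus a separate Horner loop for the position) with one fold result = result*4 + val + 1, whose +1 per element contributes exactly the length-group offset.
import Mathlib
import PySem

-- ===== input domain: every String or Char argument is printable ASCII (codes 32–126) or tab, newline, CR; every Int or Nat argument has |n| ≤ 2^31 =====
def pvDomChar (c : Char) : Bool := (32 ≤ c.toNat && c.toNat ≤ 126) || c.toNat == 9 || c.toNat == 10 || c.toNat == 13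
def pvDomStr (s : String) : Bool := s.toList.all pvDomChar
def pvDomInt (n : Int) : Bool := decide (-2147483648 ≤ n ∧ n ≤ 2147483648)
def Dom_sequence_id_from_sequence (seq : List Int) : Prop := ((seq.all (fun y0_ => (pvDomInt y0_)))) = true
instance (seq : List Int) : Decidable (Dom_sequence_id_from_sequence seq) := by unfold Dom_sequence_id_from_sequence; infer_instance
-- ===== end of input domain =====

-- ===== PORT A =====
-- A: if empty return 0; else offset = sum of 4^l for l in range(len(seq)), plus Horner position
def sequence_id_from_sequence (seq : List Int) : Int :=
  if seq.length = 0 then 0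
  else
    let offset : Int := (((List.range seq.length).map (fun l => (4 : Int) ^ l)).sum)
    let position : Int := seq.foldl (fun p v => p * 4 + v) 0
    offset + position

-- ===== PORT B =====
-- B: one fold; the +1 per element accumulates the length-group offset
def sequence_id_from_sequence_alt (seq : List Int) : Int :=
  seq.foldl (fun r v => r * 4 + v + 1) 0

-- ===== PRECONDITION & SPEC =====
def Spec_sequence_id_from_sequence (seq : List Int) (out : Int) : Prop := out = sequence_id_from_sequence_alt seq
instance (seq : List Int) (out : Int) : Decidable (Spec_sequence_id_from_sequence seq out) := by unfold Spec_sequence_id_from_sequence; infer_instance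

-- ===== CLAIM (what is proved, stated in full; the proofs are below) =====
def Claim_equal_sequence_id_from_sequence : Prop := ∀ (seq : List Int), Dom_sequence_id_from_sequence seq → Spec_sequence_id_from_sequence seq (sequence_id_from_sequence seq)

-- ===== LEMMAS AND PROOFS =====

-- ===== VERDICT (by name: the statement is the Claim_ definition above) =====
-- shifting the Horner accumulator by one adds 4^length
theorem foldA_shift (s : List Int) (c : Int) :
    s.foldl (fun p v => p * 4 + v) (c + 1) =
      s.foldl (fun p v => p * 4 + v) c + (4 : Int) ^ s.length := by
  induction s generalizing c with
  | nil => simp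
  | cons v t ih =>
    simp only [List.foldl_cons, List.length_cons]
    have : (c + 1) * 4 + v = (c * 4 + v) + 4 := by ring
    rw [this]
    have h4 : (c * 4 + v) + 4 = (((c * 4 + v) + 1) + 1) + 1 + 1 := by ring
    rw [h4, ih, ih, ih, ih]
    ring

-- B's fold equals A's Horner fold plus the geometric-sum offset
theorem foldB_eq (s : List Int) (a : Int) :
    s.foldl (fun r v => r * 4 + v + 1) a =
      s.foldl (fun p v => p * 4 + v) a +
        (((List.range s.length).map (fun l => (4 : Int) ^ l)).sum) := by
  induction s generalizing a with
  | nil => simp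
  | cons v t ih =>
    simp only [List.foldl_cons, List.length_cons]
    rw [ih]
    have : a * 4 + v + 1 = (a * 4 + v) + 1 := by ring
    rw [this, foldA_shift]
    rw [List.range_succ, List.map_append, List.sum_append]
    simp
    ring

-- ===== VERDICT (by name: the statement is the Claim_ definition above) =====
theorem sequence_id_from_sequence_spec : Claim_equal_sequence_id_from_sequence := by
  intro seq _
  unfold Spec_sequence_id_from_sequence sequence_id_from_sequence sequence_id_from_sequence_alt
  cases seq with
  | nil => simp
  | cons v t =>
    rw [foldB_eq, if_neg (by simp : ¬ (v :: t).length = 0)]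
    exact add_comm _ _
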